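-- pv_equiv track=rewrite | github.com/HBinhCT/Q-project | hackerrank/Algorithms/Winning Lottery Ticket/solution.py | winningLotteryTicket
-- ===== SOURCE A (Python) =====
-- def winningLotteryTicket(tickets):
--     digits = '0123456789'
--     frequency = [0] * 1024
--     for ticket in tickets:
--         binary = ''
--         for num in digits:
--             if num in ticket:
--                 binary += '1'
--             else:
--                 binary += '0'
--         binary = int(binary, 2)
--         frequency[binary] += 1
--     res = 0
--     for i, freq in enumerate(frequency[:1023]):
--         if freq:
--             for j in range(i + 1, 1024):
--                 if i | j == 1023:
--                     res += freq * frequency[j]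
--     res += frequency[-1] * (frequency[-1] - 1) // 2
--     return res
-- ===== SOURCE B (Python) =====
-- def winningLotteryTicket(tickets):
--     digits = '0123456789'
--     frequency = [0] * 1024
--     for ticket in tickets:
--         mask = 0
--         for num in digits:
--             mask = mask * 2 + (num in ticket)
--         frequency[mask] += 1
--     superset = frequency[:]
--     for bit in (1, 2, 4, 8, 16, 32, 64, 128, 256, 512):
--         for m in range(1024):
--             if not m & bit:
--                 superset[m] += superset[m | bit]
--     total = 0
--     for m in range(1024):
--         total += frequency[m] * superset[1023 ^ m]
--     return (total - frequency[1023]) // 2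
-- ===== Notes on version B (the rewrite author's own statement) =====
-- stated objective: alternative
-- what changed: A scans all ordered pairs of the 1024 masks (i, j>i) to find complementary pairs; B instead builds a superset-count table from the frequency table with a sum-over-subsets DP (10 passes of 1024), sums f[m]*S[1023^m] to count ordered covering pairs, and converts to unordered pairs with the closed form (total - f[1023]) // 2.
import Mathlib
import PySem

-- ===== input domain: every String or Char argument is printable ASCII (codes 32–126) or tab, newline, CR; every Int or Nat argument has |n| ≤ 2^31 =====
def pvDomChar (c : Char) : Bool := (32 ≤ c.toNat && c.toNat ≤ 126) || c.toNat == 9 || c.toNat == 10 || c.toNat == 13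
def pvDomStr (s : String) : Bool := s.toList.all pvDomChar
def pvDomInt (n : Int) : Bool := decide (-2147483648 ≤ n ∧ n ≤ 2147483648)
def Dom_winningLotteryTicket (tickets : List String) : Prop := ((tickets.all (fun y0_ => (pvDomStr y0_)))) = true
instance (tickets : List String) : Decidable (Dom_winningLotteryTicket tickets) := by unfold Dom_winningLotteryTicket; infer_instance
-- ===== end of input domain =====

-- B replaces A's O(1024^2) pair scan over the frequency table by a sum-over-subsets DP
-- (superset counts) plus a closed-form ordered-to-unordered correction; same return value.

-- ===== PORT A =====
-- list[int] assignment `xs[i] = v`; every use below has 0 ≤ i < xs.length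
def pvSet (xs : List Int) (i : Int) (v : Int) : List Int := xs.set i.toNat v

-- the body of A's `for ticket in tickets` loop: the 10-char '0'/'1' string, then int(_, 2)
def pvBinaryA (ticket : String) : List Char :=
  "0123456789".toList.foldl
    (fun b num => if PySem.Str.isIn (String.singleton num) ticket then b ++ ['1'] else b ++ ['0']) []

def pvFreqA (tickets : List String) : List Int :=
  tickets.foldl (fun freq ticket =>
    -- int(binary, 2) never raises here (always 10 binary digits), so .getD 0 is exact
    let binaryN : Int := (PySem.Int.ofCharsBase? (pvBinaryA ticket) 2).getD 0
    pvSet freq binaryN (PySem.List.pyGetD freq binaryN 0 + 1)) (List.replicate 1024 0)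

-- A's double loop over `enumerate(frequency[:1023])` and `range(i+1, 1024)`
def pvResA (frequency : List Int) : Int :=
  (PySem.List.enumerate (PySem.List.slice frequency none (some 1023))).foldl
    (fun res p =>
      if p.2 ≠ 0 then
        (PySem.List.pyRange (p.1 + 1) 1024).foldl
          (fun res j => if PySem.Int.bor p.1 j == 1023 then res + p.2 * PySem.List.pyGetD frequency j 0 else res) res
      else res) 0

def winningLotteryTicket (tickets : List String) : Int :=
  let frequency := pvFreqA tickets
  pvResA frequency +
    PySem.Int.floordiv (PySem.List.pyGetD frequency (-1) 0 * (PySem.List.pyGetD frequency (-1) 0 - 1)) 2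

-- ===== PORT B =====
-- B's per-ticket mask: m = m*2 + (num in ticket)
def pvMaskB (ticket : String) : Int :=
  "0123456789".toList.foldl
    (fun m num => m * 2 + (if PySem.Str.isIn (String.singleton num) ticket then 1 else 0)) 0

def pvFreqB (tickets : List String) : List Int :=
  tickets.foldl (fun freq ticket =>
    pvSet freq (pvMaskB ticket) (PySem.List.pyGetD freq (pvMaskB ticket) 0 + 1)) (List.replicate 1024 0)

-- one round of the sum-over-subsets DP: `for m in range(1024): if not m & bit: s[m] += s[m | bit]`
def pvRoundB (s : List Int) (bit : Int) : List Int :=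
  (PySem.List.pyRange 0 1024).foldl
    (fun s m =>
      if PySem.Int.band m bit == 0 then
        pvSet s m (PySem.List.pyGetD s m 0 + PySem.List.pyGetD s (PySem.Int.bor m bit) 0)
      else s) s

def pvSupersetB (frequency : List Int) : List Int :=
  [(1 : Int), 2, 4, 8, 16, 32, 64, 128, 256, 512].foldl pvRoundB (PySem.List.slice frequency none none)

def pvTotalB (frequency superset : List Int) : Int :=
  (PySem.List.pyRange 0 1024).foldl
    (fun tot m => tot + PySem.List.pyGetD frequency m 0 * PySem.List.pyGetD superset (PySem.Int.bxor 1023 m) 0) 0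

def winningLotteryTicket_alt (tickets : List String) : Int :=
  let frequency := pvFreqB tickets
  let superset := pvSupersetB frequency
  PySem.Int.floordiv (pvTotalB frequency superset - PySem.List.pyGetD frequency 1023 0) 2

-- ===== PRECONDITION & SPEC =====
def Spec_winningLotteryTicket (tickets : List String) (out : Int) : Prop := out = winningLotteryTicket_alt tickets
instance (tickets : List String) (out : Int) : Decidable (Spec_winningLotteryTicket tickets out) := by unfold Spec_winningLotteryTicket; infer_instance

-- ===== CLAIM (what is proved, stated in full; the proofs are below) =====
def Claim_equal_winningLotteryTicket : Prop := ∀ (tickets : List String), Dom_winningLotteryTicket tickets → Spec_winningLotteryTicket tickets (winningLotteryTicket tickets)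

-- ===== LEMMAS AND PROOFS =====

-- `f.getD k 0` as the table-entry reading both ports do
def gD (f : List Int) (k : Nat) : Int := f.getD k 0

-- the common mask value of a ticket, as a Nat
def pvMask (t : String) : Nat :=
  ("0123456789".toList.map (fun c => PySem.Str.isIn (String.singleton c) t)).foldl
    (fun a b => 2 * a + b.toNat) 0

-- the common frequency table
def buildF (tickets : List String) : List Int :=
  tickets.foldl (fun f t => f.set (pvMask t) (gD f (pvMask t) + 1)) (List.replicate 1024 0)

theorem digits_toList : "0123456789".toList = ['0','1','2','3','4','5','6','7','8','9'] := by decide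

theorem maskA_eq (t : String) :
    (PySem.Int.ofCharsBase? (pvBinaryA t) 2).getD 0 = ((pvMask t : Nat) : Int) := by
  unfold pvBinaryA pvMask
  rw [digits_toList]
  simp only [List.map, List.foldl]
  generalize PySem.Str.isIn (String.singleton '0') t = b0
  generalize PySem.Str.isIn (String.singleton '1') t = b1
  generalize PySem.Str.isIn (String.singleton '2') t = b2
  generalize PySem.Str.isIn (String.singleton '3') t = b3
  generalize PySem.Str.isIn (String.singleton '4') t = b4
  generalize PySem.Str.isIn (String.singleton '5') t = b5
  generalize PySem.Str.isIn (String.singleton '6') t = b6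
  generalize PySem.Str.isIn (String.singleton '7') t = b7
  generalize PySem.Str.isIn (String.singleton '8') t = b8
  generalize PySem.Str.isIn (String.singleton '9') t = b9
  revert b0 b1 b2 b3 b4 b5 b6 b7 b8 b9
  decide

theorem maskB_eq (t : String) : pvMaskB t = ((pvMask t : Nat) : Int) := by
  unfold pvMaskB pvMask
  rw [digits_toList]
  simp only [List.map, List.foldl]
  generalize PySem.Str.isIn (String.singleton '0') t = b0
  generalize PySem.Str.isIn (String.singleton '1') t = b1
  generalize PySem.Str.isIn (String.singleton '2') t = b2
  generalize PySem.Str.isIn (String.singleton '3') t = b3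
  generalize PySem.Str.isIn (String.singleton '4') t = b4
  generalize PySem.Str.isIn (String.singleton '5') t = b5
  generalize PySem.Str.isIn (String.singleton '6') t = b6
  generalize PySem.Str.isIn (String.singleton '7') t = b7
  generalize PySem.Str.isIn (String.singleton '8') t = b8
  generalize PySem.Str.isIn (String.singleton '9') t = b9
  revert b0 b1 b2 b3 b4 b5 b6 b7 b8 b9
  decide

theorem freqA_eq (tickets : List String) : pvFreqA tickets = buildF tickets := by
  unfold pvFreqA buildF
  apply List.foldl_ext
  intro f t _
  simp only [maskA_eq, pvSet, PySem.List.pyGetD_natCast, Int.toNat_natCast, gD]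

theorem freqB_eq (tickets : List String) : pvFreqB tickets = buildF tickets := by
  unfold pvFreqB buildF
  apply List.foldl_ext
  intro f t _
  simp only [maskB_eq, pvSet, PySem.List.pyGetD_natCast, Int.toNat_natCast, gD]

theorem buildF_length (tickets : List String) : (buildF tickets).length = 1024 := by
  unfold buildF
  induction tickets using List.reverseRecOn with
  | nil => rw [List.foldl_nil, List.length_replicate]
  | append_singleton ts t ih => rw [List.foldl_append, List.foldl_cons, List.foldl_nil, List.length_set, ih]

-- A's value of the double loop, as a triangular sum
theorem listSum_range (n : ℕ) (h : ℕ → ℤ) : ((List.range n).map h).sum = ∑ i ∈ Finset.range n, h i := by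
  induction n with
  | zero => simp
  | succ n ih => simp [List.range_succ, Finset.sum_range_succ, ih]

theorem foldl_ite_add {β : Type} (l : List β) (p : β → Bool) (g : β → Int) (a : Int) :
    l.foldl (fun acc x => if p x then acc + g x else acc) a
      = a + (l.map fun x => if p x then g x else 0).sum := by
  rw [List.foldl_ext (g := fun acc x => acc + (if p x then g x else 0))
    (f := fun acc x => if p x then acc + g x else acc)]
  · exact PySem.List.foldl_add l _ a
  · intro acc b _; split <;> simp

set_option maxRecDepth 8192 in
theorem innerA (f : List Int) (k : Nat) (hk : k < 1023) (v res : Int) :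
    (PySem.List.pyRange ((k : Int) + 1) 1024).foldl
        (fun res j => if PySem.Int.bor (k : Int) j == 1023 then res + v * PySem.List.pyGetD f j 0 else res) res
      = res + ∑ j ∈ Finset.range 1024, if k < j ∧ (k ||| j) = 1023 then v * gD f j else 0 := by
  have h1 : ((k : Int) + 1) = ((k + 1 : Nat) : Int) := by push_cast; ring
  rw [h1, PySem.List.pyRange_one, List.foldl_map, foldl_ite_add]
  have h2 : ((1024 : Int) - ((k+1 : Nat) : Int)).toNat = 1023 - k := by omega
  rw [h2]
  congr 1
  rw [listSum_range]
  have h3 : ∀ i : ℕ,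
      (if PySem.Int.bor (k : Int) (((k+1:Nat) : Int) + (i:Int)) == 1023
        then v * PySem.List.pyGetD f (((k+1:Nat) : Int) + (i:Int)) 0 else 0)
      = (if (k ||| (k+1+i)) = 1023 then v * gD f (k+1+i) else 0) := by
    intro i
    have hc : (((k+1:Nat) : Int) + (i:Int)) = ((k + 1 + i : Nat) : Int) := by push_cast; ring
    rw [hc, PySem.Int.bor_natCast, PySem.List.pyGetD_natCast]
    by_cases h : (k ||| (k+1+i)) = 1023
    · simp [h, gD]
    · have : ¬ (((k ||| (k+1+i) : Nat) : Int) = (1023:Int)) := by exact_mod_cast h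
      simp [h, this]
  have step1 : (∑ i ∈ Finset.range (1023 - k),
        (if PySem.Int.bor (k : Int) (((k+1:Nat) : Int) + (i:Int)) == 1023
          then v * PySem.List.pyGetD f (((k+1:Nat) : Int) + (i:Int)) 0 else 0))
      = ∑ i ∈ Finset.range (1023 - k), (if (k ||| (k+1+i)) = 1023 then v * gD f (k+1+i) else 0) :=
    Finset.sum_congr rfl (fun i _ => h3 i)
  rw [step1]
  have h4 : 1023 - k = 1024 - (k+1) := by omega
  rw [h4, ← Finset.sum_Ico_eq_sum_range (fun j : ℕ => if (k ||| j) = 1023 then v * gD f j else 0) (k+1) 1024]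
  rw [Finset.range_eq_Ico, ← Finset.sum_Ico_consecutive _ (by omega : 0 ≤ k+1) (by omega : k+1 ≤ 1024)]
  have hz : ∑ j ∈ Finset.Ico 0 (k+1), (if k < j ∧ (k ||| j) = 1023 then v * gD f j else 0) = 0 := by
    apply Finset.sum_eq_zero; intro j hj; simp at hj
    have : ¬ (k < j ∧ (k ||| j) = 1023) := by omega
    simp [this]
  rw [hz, zero_add]
  apply Finset.sum_congr rfl; intro j hj; simp at hj
  have hlt : (k < j) := by omega
  simp [hlt]

theorem getD_take (f : List ℤ) (i n : ℕ) (hi : i < n) : (f.take n).getD i 0 = f.getD i 0 := by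
  simp [List.getD_eq_getElem?_getD, List.getElem?_take_of_lt hi]

theorem resA_eq (f : List Int) (hf : f.length = 1024) :
    pvResA f = ∑ i ∈ Finset.range 1024, ∑ j ∈ Finset.range 1024,
      if i < j ∧ (i ||| j) = 1023 then gD f i * gD f j else 0 := by
  unfold pvResA
  rw [show ((1023:Int)) = ((1023:Nat):Int) by norm_num, PySem.List.slice_to_natCast]
  rw [PySem.List.enumerate_eq_map_pyRange _ 0]
  have hlen : PySem.List.len (f.take 1023) = ((1023:Nat) : Int) := by
    simp [PySem.List.len, hf]
  rw [hlen, List.foldl_map, PySem.List.pyRange_one]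
  have h0 : (((1023:Nat):Int) - 0).toNat = 1023 := by omega
  rw [h0, List.foldl_map]
  have key : ∀ (i : ℕ), i < 1023 → ∀ (res : Int),
      (if PySem.List.pyGetD (f.take 1023) ((0:Int) + (i:Int)) 0 ≠ 0 then
          (PySem.List.pyRange (((0:Int) + (i:Int)) + 1) 1024).foldl
            (fun res j => if PySem.Int.bor ((0:Int) + (i:Int)) j == 1023 then
              res + PySem.List.pyGetD (f.take 1023) ((0:Int) + (i:Int)) 0 * PySem.List.pyGetD f j 0 else res) res
        else res)
      = res + ∑ j ∈ Finset.range 1024, if i < j ∧ (i ||| j) = 1023 then gD f i * gD f j else 0 := by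
    intro i hi res
    have hz : ((0:Int) + (i:Int)) = ((i:Nat) : Int) := by ring
    rw [hz, PySem.List.pyGetD_natCast]
    have hval : (f.take 1023).getD i 0 = gD f i := getD_take f i 1023 hi
    rw [hval]
    by_cases hv : gD f i = 0
    · simp only [hv, ne_eq, not_true_eq_false, if_false]
      have hzz : ∑ x ∈ Finset.range 1024, (if i < x ∧ (i ||| x) = 1023 then (0:ℤ) * gD f x else 0) = 0 := by
        apply Finset.sum_eq_zero; intro j _; simp
      rw [hzz, add_zero]
    · simp only [hv, ne_eq, not_false_eq_true, if_true]
      exact innerA f i hi (gD f i) res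
  trans (List.foldl (fun (res : Int) (i : ℕ) =>
      res + ∑ j ∈ Finset.range 1024, if i < j ∧ (i ||| j) = 1023 then gD f i * gD f j else 0) 0 (List.range 1023))
  · apply List.foldl_ext
    intro res i hi
    rw [List.mem_range] at hi
    exact key i hi res
  · rw [PySem.List.foldl_add, listSum_range, zero_add]
    exact Finset.sum_subset (by intro a ha; rw [Finset.mem_range] at ha ⊢; omega : Finset.range 1023 ⊆ Finset.range 1024) (fun x hx hnx => by
      rw [Finset.mem_range] at hx
      rw [Finset.mem_range] at hnx
      apply Finset.sum_eq_zero; intro j hj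
      rw [Finset.mem_range] at hj
      have : ¬ (x < j ∧ (x ||| j) = 1023) := by rintro ⟨h1, -⟩; omega
      simp [this])

-- sum-over-subsets target value
def sosSum (f : List Int) (d k : Nat) : Int :=
  ∑ t ∈ Finset.range (2 ^ d), if t &&& k = 0 then gD f (k ||| t) else 0

theorem or_two_pow_eq_add {d t : ℕ} (h : t < 2^d) : 2^d ||| t = 2^d + t := by
  apply Nat.eq_of_testBit_eq; intro i
  rcases lt_trichotomy i d with hh|rfl|hh
  · rw [Nat.testBit_two_pow_add_gt hh, Nat.testBit_or, Nat.testBit_two_pow_of_ne (by omega)]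
    simp
  · rw [Nat.testBit_two_pow_add_eq, Nat.testBit_or, Nat.testBit_two_pow_self,
      Nat.testBit_lt_two_pow h]
    simp
  · have h2 : 2^d + t < 2^i := by
      have h3 : 2^(d+1) ≤ 2^i := Nat.pow_le_pow_right (by norm_num) (by omega)
      have h4 := Nat.pow_lt_pow_right (a := 2) (by norm_num) (show d < i by omega)
      have : 2^d + t < 2^(d+1) := by rw [pow_succ]; omega
      omega
    rw [Nat.testBit_lt_two_pow h2, Nat.testBit_or,
      Nat.testBit_two_pow_of_ne (by omega),
      Nat.testBit_lt_two_pow (lt_trans h (Nat.pow_lt_pow_right (by norm_num) hh))]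
    simp

theorem nat_or_eq_zero {a b : ℕ} : a ||| b = 0 ↔ a = 0 ∧ b = 0 := by
  constructor
  · intro h
    refine ⟨Nat.eq_of_testBit_eq fun i => ?_, Nat.eq_of_testBit_eq fun i => ?_⟩ <;>
    · have h2 := congrArg (fun x => Nat.testBit x i) h
      simp only [Nat.testBit_or, Nat.zero_testBit, Bool.or_eq_false_iff] at h2
      simp only [Nat.zero_testBit]
      tauto
  · rintro ⟨rfl, rfl⟩; rfl

theorem gD_set (s : List Int) (r k : ℕ) (v : ℤ) (hr : r < s.length) :
    gD (s.set r v) k = if k = r then v else gD s k := by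
  unfold gD
  rw [List.getD_eq_getElem?_getD, List.getD_eq_getElem?_getD, List.getElem?_set]
  split
  · rename_i h; subst h; simp [hr]
  · rename_i h; rw [if_neg (fun hh => h hh.symm)]

theorem and_two_pow_eq_zero {d t : ℕ} (h : t < 2^d) : t &&& 2^d = 0 := by
  rw [Nat.and_two_pow, Nat.testBit_lt_two_pow h]; simp

theorem round_go (b : Nat) (hb1 : 0 < b) (hb2 : b < 1024) (s0 : List Int) :
    ∀ (n r : Nat), r + n = 1024 →
    ∀ s : List Int, s.length = 1024 →
    (∀ k, k < 1024 → gD s k = if k < r ∧ k &&& b = 0 then gD s0 k + gD s0 (k ||| b) else gD s0 k) →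
    (((PySem.List.pyRange (r : Int) 1024).foldl
      (fun s m => if PySem.Int.band m (b : Int) == 0 then
          pvSet s m (PySem.List.pyGetD s m 0 + PySem.List.pyGetD s (PySem.Int.bor m (b : Int)) 0)
        else s) s).length = 1024
    ∧ ∀ k, k < 1024 → gD ((PySem.List.pyRange (r : Int) 1024).foldl
      (fun s m => if PySem.Int.band m (b : Int) == 0 then
          pvSet s m (PySem.List.pyGetD s m 0 + PySem.List.pyGetD s (PySem.Int.bor m (b : Int)) 0)
        else s) s) k
      = if k &&& b = 0 then gD s0 k + gD s0 (k ||| b) else gD s0 k) := by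
  intro n
  induction n with
  | zero =>
    intro r hr s hs hinv
    rw [PySem.List.pyRange_one_eq_nil (by omega)]
    refine ⟨hs, fun k hk => ?_⟩
    rw [List.foldl_nil, hinv k hk]
    have : k < r := by omega
    simp [this]
  | succ n ih =>
    intro r hr s hs hinv
    rw [PySem.List.pyRange_one_cons (by omega : (r:Int) < 1024), List.foldl_cons]
    have horb_lt : r ||| b < 1024 := by
      have : (1024:ℕ) = 2^10 := by norm_num
      rw [this] at hb2 ⊢
      exact Nat.or_lt_two_pow (by omega) hb2
    by_cases hrb : r &&& b = 0
    · have hcond : (PySem.Int.band (r : Int) (b : Int) == 0) = true := by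
        rw [PySem.Int.band_natCast, hrb]; rfl
      rw [hcond, if_pos rfl]
      have hread1 : PySem.List.pyGetD s (r : Int) 0 = gD s0 r := by
        rw [PySem.List.pyGetD_natCast]
        have h5 := hinv r (by omega)
        rw [if_neg (by rintro ⟨h1,-⟩; omega)] at h5
        exact h5
      have hread2 : PySem.List.pyGetD s (PySem.Int.bor (r:Int) (b:Int)) 0 = gD s0 (r ||| b) := by
        rw [PySem.Int.bor_natCast, PySem.List.pyGetD_natCast]
        have := hinv (r ||| b) horb_lt
        have hne : (r ||| b) &&& b ≠ 0 := by
          rw [Nat.and_or_distrib_right, Nat.and_self]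
          intro hcontra
          exact hb1.ne' (nat_or_eq_zero.mp hcontra).2
        simp [hne] at this
        exact this
      rw [hread1, hread2]
      have hset : pvSet s (r:Int) (gD s0 r + gD s0 (r ||| b)) = s.set r (gD s0 r + gD s0 (r ||| b)) := by
        unfold pvSet; rw [Int.toNat_natCast]
      rw [hset]
      have hlen' : (s.set r (gD s0 r + gD s0 (r ||| b))).length = 1024 := by rw [List.length_set]; exact hs
      have hcast : ((r:Int) + 1) = (((r+1 : Nat)) : Int) := by push_cast; ring
      rw [hcast]
      apply ih (r+1) (by omega) _ hlen'
      intro k hk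
      rw [gD_set s r k _ (by omega)]
      by_cases hkr : k = r
      · subst hkr
        simp [hrb]
      · rw [if_neg hkr, hinv k hk]
        have : (k < r ∧ k &&& b = 0) ↔ (k < r + 1 ∧ k &&& b = 0) := by
          constructor <;> rintro ⟨h1, h2⟩ <;> exact ⟨by omega, h2⟩
        rw [if_congr this rfl rfl]
    · have hcond : (PySem.Int.band (r : Int) (b : Int) == 0) = false := by
        rw [PySem.Int.band_natCast]
        simp [hrb]
      rw [hcond]
      simp only [Bool.false_eq_true, if_false]
      have hcast : ((r:Int) + 1) = (((r+1 : Nat)) : Int) := by push_cast; ring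
      rw [hcast]
      apply ih (r+1) (by omega) _ hs
      intro k hk
      rw [hinv k hk]
      by_cases hkr : k = r
      · subst hkr
        simp [hrb]
      · have : (k < r ∧ k &&& b = 0) ↔ (k < r + 1 ∧ k &&& b = 0) := by
          constructor <;> rintro ⟨h1, h2⟩ <;> exact ⟨by omega, h2⟩
        rw [if_congr this rfl rfl]

theorem round_spec (s : List Int) (hs : s.length = 1024) (b : Nat) (hb1 : 0 < b) (hb2 : b < 1024) :
    (pvRoundB s (b : Int)).length = 1024
    ∧ ∀ k, k < 1024 → gD (pvRoundB s (b : Int)) k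
        = if k &&& b = 0 then gD s k + gD s (k ||| b) else gD s k := by
  have h := round_go b hb1 hb2 s 1024 0 (by omega) s hs (by intro k hk; simp)
  unfold pvRoundB
  exact_mod_cast h

set_option maxRecDepth 4096 in
theorem sos_step (f S : List Int) (hS : S.length = 1024) (d : Nat) (hd : d < 10)
    (h : ∀ k, k < 1024 → gD S k = sosSum f d k) :
    (pvRoundB S ((2^d : Nat) : Int)).length = 1024
    ∧ ∀ k, k < 1024 → gD (pvRoundB S ((2^d : Nat) : Int)) k = sosSum f (d+1) k := by
  have hb1 : 0 < 2^d := Nat.two_pow_pos d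
  have hb2 : (2:ℕ)^d < 1024 := by
    calc (2:ℕ)^d < 2^10 := Nat.pow_lt_pow_right (by norm_num) hd
    _ = 1024 := by norm_num
  obtain ⟨hlen, hval⟩ := round_spec S hS (2^d) hb1 hb2
  refine ⟨hlen, fun k hk => ?_⟩
  rw [hval k hk]
  -- split sosSum f (d+1) k
  have hsplit : sosSum f (d+1) k
      = sosSum f d k + ∑ i ∈ Finset.range (2^d), (if (2^d ||| i) &&& k = 0 then gD f (k ||| (2^d ||| i)) else 0) := by
    unfold sosSum
    rw [show Finset.range (2^(d+1)) = Finset.Ico 0 (2^(d+1)) from congrFun Finset.range_eq_Ico _, ← Finset.sum_Ico_consecutive _ (Nat.zero_le (2^d))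
        (by rw [pow_succ]; omega : 2^d ≤ 2^(d+1)), ← Finset.range_eq_Ico,
      Finset.sum_Ico_eq_sum_range]
    have he : 2^(d+1) - 2^d = 2^d := by rw [pow_succ]; omega
    rw [he]
    congr 1
    apply Finset.sum_congr rfl
    intro i hi
    rw [Finset.mem_range] at hi
    rw [or_two_pow_eq_add hi]
  rw [hsplit]
  by_cases hkb : k &&& 2^d = 0
  · rw [if_pos hkb]
    congr 1
    · exact h k hk
    · have hk2 : k ||| 2^d < 1024 := by
        have h10 : (1024:ℕ) = 2^10 := by norm_num
        rw [h10] at hk hb2 ⊢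
        exact Nat.or_lt_two_pow hk hb2
      rw [h (k ||| 2^d) hk2]
      unfold sosSum
      apply Finset.sum_congr rfl
      intro i hi
      rw [Finset.mem_range] at hi
      have hc1 : (2^d ||| i) &&& k = (2^d &&& k) ||| (i &&& k) := Nat.and_or_distrib_right _ _ _
      have hc2 : i &&& (k ||| 2^d) = (i &&& k) ||| (i &&& 2^d) := Nat.and_or_distrib_left _ _ _
      have hc3 : i &&& 2^d = 0 := and_two_pow_eq_zero hi
      have hcond : ((2^d ||| i) &&& k = 0) ↔ (i &&& (k ||| 2^d) = 0) := by
        rw [hc1, hc2, hc3, Nat.and_comm (2^d) k, hkb]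
        simp [nat_or_eq_zero]
      have harg : k ||| (2^d ||| i) = (k ||| 2^d) ||| i := (Nat.or_assoc k (2^d) i).symm
      rw [harg]
      exact if_congr hcond.symm rfl rfl
  · rw [if_neg hkb]
    have hz : ∑ i ∈ Finset.range (2^d), (if (2^d ||| i) &&& k = 0 then gD f (k ||| (2^d ||| i)) else 0) = 0 := by
      apply Finset.sum_eq_zero
      intro i _
      have hc1 : (2^d ||| i) &&& k = (2^d &&& k) ||| (i &&& k) := Nat.and_or_distrib_right _ _ _
      have : ¬ ((2^d ||| i) &&& k = 0) := by
        rw [hc1]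
        intro hcontra
        exact hkb (by rw [Nat.and_comm]; exact (nat_or_eq_zero.mp hcontra).1)
      rw [if_neg this]
    rw [hz, add_zero]
    exact h k hk

theorem superset_start (f : List Int) : ∀ k, k < 1024 → gD f k = sosSum f 0 k := by
  intro k hk
  unfold sosSum
  rw [pow_zero, Finset.sum_range_one, Nat.zero_and, Nat.or_zero]
  simp

set_option maxRecDepth 4096 in
theorem superset_spec (f : List Int) (hf : f.length = 1024) :
    (pvSupersetB f).length = 1024 ∧ ∀ k, k < 1024 → gD (pvSupersetB f) k = sosSum f 10 k := by
  unfold pvSupersetB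
  rw [PySem.List.slice_none_none]
  rw [List.foldl_cons, List.foldl_cons, List.foldl_cons, List.foldl_cons, List.foldl_cons, List.foldl_cons, List.foldl_cons, List.foldl_cons, List.foldl_cons, List.foldl_cons, List.foldl_nil]
  have h0 := sos_step f _ hf 0 (by norm_num) (superset_start f)
  rw [show (((2^0 : Nat)) : Int) = (1:Int) by norm_num] at h0
  have h1 := sos_step f _ h0.1 1 (by norm_num) h0.2
  rw [show (((2^1 : Nat)) : Int) = (2:Int) by norm_num] at h1
  have h2 := sos_step f _ h1.1 2 (by norm_num) h1.2
  rw [show (((2^2 : Nat)) : Int) = (4:Int) by norm_num] at h2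
  have h3 := sos_step f _ h2.1 3 (by norm_num) h2.2
  rw [show (((2^3 : Nat)) : Int) = (8:Int) by norm_num] at h3
  have h4 := sos_step f _ h3.1 4 (by norm_num) h3.2
  rw [show (((2^4 : Nat)) : Int) = (16:Int) by norm_num] at h4
  have h5 := sos_step f _ h4.1 5 (by norm_num) h4.2
  rw [show (((2^5 : Nat)) : Int) = (32:Int) by norm_num] at h5
  have h6 := sos_step f _ h5.1 6 (by norm_num) h5.2
  rw [show (((2^6 : Nat)) : Int) = (64:Int) by norm_num] at h6
  have h7 := sos_step f _ h6.1 7 (by norm_num) h6.2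
  rw [show (((2^7 : Nat)) : Int) = (128:Int) by norm_num] at h7
  have h8 := sos_step f _ h7.1 8 (by norm_num) h7.2
  rw [show (((2^8 : Nat)) : Int) = (256:Int) by norm_num] at h8
  have h9 := sos_step f _ h8.1 9 (by norm_num) h8.2
  rw [show (((2^9 : Nat)) : Int) = (512:Int) by norm_num] at h9
  exact ⟨h9.1, h9.2⟩

theorem tb_high {x : ℕ} (hx : x < 1024) {i : ℕ} (hi : 10 ≤ i) : x.testBit i = false := by
  apply Nat.testBit_lt_two_pow
  calc x < 1024 := hx
    _ = 2^10 := by norm_num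
    _ ≤ 2^i := Nat.pow_le_pow_right (by norm_num) hi

theorem tb1023 (i : ℕ) : (1023:ℕ).testBit i = decide (i < 10) := by
  rw [show (1023:ℕ) = 2^10 - 1 by norm_num, Nat.testBit_two_pow_sub_one]

theorem and_eq_zero_iff_tb {a b : ℕ} : a &&& b = 0 ↔ ∀ i, ¬(a.testBit i = true ∧ b.testBit i = true) := by
  constructor
  · intro h i ⟨h1, h2⟩
    have h3 := congrArg (fun x => Nat.testBit x i) h
    simp only [Nat.testBit_and, Nat.zero_testBit, h1, h2, Bool.and_self] at h3
    exact Bool.true_eq_false.mp h3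
  · intro h
    apply Nat.eq_of_testBit_eq
    intro i
    simp only [Nat.testBit_and, Nat.zero_testBit, Bool.and_eq_false_iff]
    have := h i
    by_cases ha : a.testBit i <;> by_cases hb : b.testBit i <;> simp_all

theorem sos_cov (f : List Int) (m : ℕ) (hm : m < 1024) :
    sosSum f 10 (1023 ^^^ m)
      = ∑ j ∈ Finset.range 1024, if (m ||| j) = 1023 then gD f j else 0 := by
  unfold sosSum
  rw [show (2:ℕ)^10 = 1024 by norm_num]
  rw [← Finset.sum_filter, ← Finset.sum_filter]
  have hc : 1023 ^^^ m < 1024 := by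
    rw [show (1024:ℕ) = 2^10 by norm_num] at hm ⊢
    exact Nat.xor_lt_two_pow (by norm_num) hm
  apply Finset.sum_nbij' (i := fun t => (1023 ^^^ m) ||| t) (j := fun j => j &&& m)
  · intro t ht
    rw [Finset.mem_filter, Finset.mem_range] at ht ⊢
    obtain ⟨ht1, ht2⟩ := ht
    constructor
    · rw [show (1024:ℕ) = 2^10 by norm_num] at hc ht1 ⊢
      exact Nat.or_lt_two_pow hc ht1
    · apply Nat.eq_of_testBit_eq
      intro i
      by_cases hi : i < 10
      · simp only [Nat.testBit_or, Nat.testBit_xor, tb1023, hi, decide_true]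
        by_cases hmi : m.testBit i = true <;> simp [hmi]
      · have e1 := tb_high hm (le_of_not_gt hi)
        have e2 := tb_high ht1 (le_of_not_gt hi)
        have e3 := tb_high (show (1023:ℕ) < 1024 by norm_num) (le_of_not_gt hi)
        simp [Nat.testBit_or, Nat.testBit_xor, e1, e2, e3]
  · intro j hj
    rw [Finset.mem_filter, Finset.mem_range] at hj ⊢
    obtain ⟨hj1, hj2⟩ := hj
    refine ⟨lt_of_le_of_lt Nat.and_le_left hj1, ?_⟩
    rw [and_eq_zero_iff_tb]
    intro i ⟨h1, h2⟩
    rw [Nat.testBit_and, Bool.and_eq_true] at h1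
    obtain ⟨hji, hmi⟩ := h1
    by_cases hi : i < 10
    · rw [Nat.testBit_xor, hmi, tb1023] at h2
      simp [hi] at h2
    · rw [tb_high hm (le_of_not_gt hi)] at hmi
      exact Bool.false_ne_true hmi
  · intro t ht
    rw [Finset.mem_filter, Finset.mem_range] at ht
    obtain ⟨ht1, ht2⟩ := ht
    rw [and_eq_zero_iff_tb] at ht2
    apply Nat.eq_of_testBit_eq
    intro i
    simp only [Nat.testBit_and, Nat.testBit_or, Nat.testBit_xor]
    by_cases hi : i < 10
    · rw [tb1023]
      by_cases hmi : m.testBit i = true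
      · simp [hmi, hi]
      · rw [Bool.not_eq_true] at hmi
        have hti : t.testBit i = false := by
          by_contra hcon
          rw [Bool.not_eq_false] at hcon
          exact ht2 i ⟨hcon, by rw [Nat.testBit_xor, tb1023, hmi]; simp [hi]⟩
        simp [hmi, hi, hti]
    · have e1 := tb_high hm (le_of_not_gt hi)
      have e2 := tb_high ht1 (le_of_not_gt hi)
      have e3 := tb_high (show (1023:ℕ) < 1024 by norm_num) (le_of_not_gt hi)
      simp [e1, e2, e3]
  · intro j hj
    rw [Finset.mem_filter, Finset.mem_range] at hj
    obtain ⟨hj1, hj2⟩ := hj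
    apply Nat.eq_of_testBit_eq
    intro i
    simp only [Nat.testBit_or, Nat.testBit_xor, Nat.testBit_and]
    by_cases hi : i < 10
    · rw [tb1023]
      by_cases hmi : m.testBit i = true
      · simp [hmi, hi]
      · rw [Bool.not_eq_true] at hmi
        have hji : j.testBit i = true := by
          have h4 := congrArg (fun x => Nat.testBit x i) hj2
          simp only [Nat.testBit_or, tb1023, hmi] at h4
          simpa [hi] using h4
        simp [hmi, hi, hji]
    · have e1 := tb_high hm (le_of_not_gt hi)
      have e2 := tb_high hj1 (le_of_not_gt hi)
      have e3 := tb_high (show (1023:ℕ) < 1024 by norm_num) (le_of_not_gt hi)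
      simp [e1, e2, e3]
  · intro t _
    rfl

theorem total_eq (f : List Int) (hf : f.length = 1024) :
    pvTotalB f (pvSupersetB f)
      = ∑ m ∈ Finset.range 1024, ∑ j ∈ Finset.range 1024,
          if (m ||| j) = 1023 then gD f m * gD f j else 0 := by
  obtain ⟨hSlen, hSval⟩ := superset_spec f hf
  unfold pvTotalB
  rw [PySem.List.pyRange_one, show ((1024:Int) - 0).toNat = 1024 by omega, List.foldl_map,
    PySem.List.foldl_add, listSum_range, zero_add]
  apply Finset.sum_congr rfl
  intro m hmr
  rw [Finset.mem_range] at hmr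
  have hz : ((0:Int) + (m:Int)) = ((m : Nat) : Int) := by ring
  rw [hz, PySem.List.pyGetD_natCast]
  rw [show (1023:Int) = ((1023:Nat) : Int) by norm_num, PySem.Int.bxor_natCast,
    PySem.List.pyGetD_natCast]
  have hxl : 1023 ^^^ m < 1024 := by
    rw [show (1024:ℕ) = 2^10 by norm_num] at hmr ⊢
    exact Nat.xor_lt_two_pow (by norm_num) hmr
  have : (pvSupersetB f).getD (1023 ^^^ m) 0 = sosSum f 10 (1023 ^^^ m) := hSval _ hxl
  rw [show (pvSupersetB f).getD (1023 ^^^ m) 0 = gD (pvSupersetB f) (1023 ^^^ m) from rfl] at this ⊢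
  rw [this, sos_cov f m hmr, Finset.mul_sum]
  apply Finset.sum_congr rfl
  intro j _
  rw [mul_ite, mul_zero]
  rfl

set_option maxRecDepth 16384 in
set_option maxHeartbeats 1000000 in
theorem sall_split (f : List Int) :
    (∑ m ∈ Finset.range 1024, ∑ j ∈ Finset.range 1024,
        if (m ||| j) = 1023 then gD f m * gD f j else 0)
      = 2 * (∑ i ∈ Finset.range 1024, ∑ j ∈ Finset.range 1024,
          if i < j ∧ (i ||| j) = 1023 then gD f i * gD f j else 0)
        + gD f 1023 * gD f 1023 := by
  have hsplit : ∀ m j : ℕ, (if (m ||| j) = 1023 then gD f m * gD f j else 0)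
      = (if m < j ∧ (m ||| j) = 1023 then gD f m * gD f j else 0)
        + (if j < m ∧ (m ||| j) = 1023 then gD f m * gD f j else 0)
        + (if m = j ∧ (m ||| j) = 1023 then gD f m * gD f j else 0) := by
    intro m j
    rcases lt_trichotomy m j with h|h|h
    · have h2 : ¬ j < m := by omega
      have h3 : ¬ m = j := by omega
      by_cases hc : (m ||| j) = 1023 <;> simp [h, h2, h3, hc]
    · have h2 : ¬ m < j := by omega
      have h3 : ¬ j < m := by omega
      by_cases hc : (m ||| j) = 1023 <;> simp [h, h2, h3, hc]
    · have h2 : ¬ m < j := by omega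
      have h3 : ¬ m = j := by omega
      by_cases hc : (m ||| j) = 1023 <;> simp [h, h2, h3, hc]
  have hS2 : (∑ m ∈ Finset.range 1024, ∑ j ∈ Finset.range 1024,
        if j < m ∧ (m ||| j) = 1023 then gD f m * gD f j else 0)
      = (∑ m ∈ Finset.range 1024, ∑ j ∈ Finset.range 1024,
        if m < j ∧ (m ||| j) = 1023 then gD f m * gD f j else 0) := by
    rw [Finset.sum_comm]
    apply Finset.sum_congr rfl
    intro m _
    apply Finset.sum_congr rfl
    intro j _
    have hcmm : (j ||| m) = (m ||| j) := Nat.or_comm j m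
    by_cases h : m < j ∧ (m ||| j) = 1023
    · rw [if_pos (by rw [hcmm]; exact h), if_pos h, mul_comm]
    · rw [if_neg (by rw [hcmm]; exact h), if_neg h]
  have hS3 : (∑ m ∈ Finset.range 1024, ∑ j ∈ Finset.range 1024,
        if m = j ∧ (m ||| j) = 1023 then gD f m * gD f j else 0)
      = gD f 1023 * gD f 1023 := by
    have hstep : ∀ m : ℕ, m < 1024 → (∑ j ∈ Finset.range 1024,
        if m = j ∧ (m ||| j) = 1023 then gD f m * gD f j else 0)
        = (if m = 1023 then gD f m * gD f m else 0) := by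
      intro m hm
      have hite : ∀ j : ℕ, (if m = j ∧ (m ||| j) = 1023 then gD f m * gD f j else 0)
          = if m = j then (if (m ||| j) = 1023 then gD f m * gD f j else 0) else 0 :=
        fun j => ite_and _ _ _ _
      rw [Finset.sum_congr rfl (fun j _ => hite j),
        Finset.sum_ite_eq (Finset.range 1024) m
          (fun j => if (m ||| j) = 1023 then gD f m * gD f j else 0)]
      rw [if_pos (Finset.mem_range.mpr hm), Nat.or_self]
    rw [Finset.sum_congr rfl (fun m hm => hstep m (Finset.mem_range.mp hm)),
      Finset.sum_ite_eq' (Finset.range 1024) 1023 (fun m => gD f m * gD f m)]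
    rw [if_pos (Finset.mem_range.mpr (by norm_num))]
  calc (∑ m ∈ Finset.range 1024, ∑ j ∈ Finset.range 1024,
        if (m ||| j) = 1023 then gD f m * gD f j else 0)
      = (∑ m ∈ Finset.range 1024, ∑ j ∈ Finset.range 1024,
          if m < j ∧ (m ||| j) = 1023 then gD f m * gD f j else 0)
        + (∑ m ∈ Finset.range 1024, ∑ j ∈ Finset.range 1024,
          if j < m ∧ (m ||| j) = 1023 then gD f m * gD f j else 0)
        + (∑ m ∈ Finset.range 1024, ∑ j ∈ Finset.range 1024,
          if m = j ∧ (m ||| j) = 1023 then gD f m * gD f j else 0) := by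
        rw [← Finset.sum_add_distrib, ← Finset.sum_add_distrib]
        apply Finset.sum_congr rfl
        intro m _
        rw [← Finset.sum_add_distrib, ← Finset.sum_add_distrib]
        apply Finset.sum_congr rfl
        intro j _
        exact hsplit m j
    _ = 2 * (∑ i ∈ Finset.range 1024, ∑ j ∈ Finset.range 1024,
          if i < j ∧ (i ||| j) = 1023 then gD f i * gD f j else 0)
        + gD f 1023 * gD f 1023 := by
        rw [hS2, hS3]
        ring

theorem pyGetD_neg_one (f : List Int) (hf : f.length = 1024) :
    PySem.List.pyGetD f (-1) 0 = gD f 1023 := by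
  simp [PySem.List.pyGetD, PySem.List.pyGet?, PySem.List.pyIdx?, hf, gD,
    List.getD_eq_getElem?_getD]

theorem main_eq (f : List Int) (hf : f.length = 1024) :
    pvResA f + PySem.Int.floordiv (PySem.List.pyGetD f (-1) 0 * (PySem.List.pyGetD f (-1) 0 - 1)) 2
      = PySem.Int.floordiv (pvTotalB f (pvSupersetB f) - PySem.List.pyGetD f 1023 0) 2 := by
  rw [pyGetD_neg_one f hf, PySem.List.pyGetD_ofNat',
    show f.getD 1023 0 = gD f 1023 from rfl,
    resA_eq f hf, total_eq f hf, sall_split f]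
  set T := ∑ i ∈ Finset.range 1024, ∑ j ∈ Finset.range 1024,
      if i < j ∧ (i ||| j) = 1023 then gD f i * gD f j else 0 with hT
  set x := gD f 1023 with hx
  obtain ⟨c, hc⟩ := Int.even_mul_pred_self x
  have h1 : PySem.Int.floordiv (x * (x - 1)) 2 = c := by
    rw [hc, PySem.Int.floordiv_eq_ediv_of_pos (by norm_num)]
    omega
  have h2 : 2 * T + x * x - x = 2 * (T + c) := by
    have hxx : x * x - x = c + c := by rw [← hc]; ring
    omega
  have h3 : PySem.Int.floordiv (2 * T + x * x - x) 2 = T + c := by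
    rw [h2, PySem.Int.floordiv_eq_ediv_of_pos (by norm_num)]
    omega
  rw [h1, show 2 * T + x * x - x = 2 * T + x * x - x from rfl] at *
  rw [show (2 * T + x * x) - x = 2 * T + x * x - x from rfl]
  rw [h3]

-- ===== VERDICT (by name: the statement is the Claim_ definition above) =====
theorem winningLotteryTicket_spec : Claim_equal_winningLotteryTicket := by
  intro tickets _
  show winningLotteryTicket tickets = winningLotteryTicket_alt tickets
  unfold winningLotteryTicket winningLotteryTicket_alt
  rw [freqA_eq, freqB_eq]
  exact main_eq (buildF tickets) (buildF_length tickets)
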